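-- pv_equiv track=rewrite | github.com/3D-face-recognition/3D-Face-Recongnition | 3DFER/src/hole_finder.py | __is_line_use_over_twice
-- ===== SOURCE A (Python) =====
-- def __is_line_use_over_twice(hole, one_ring_triangles):
--     one_ring_vertices = [one_ring_vertex for one_ring_triangle in one_ring_triangles for one_ring_vertex in one_ring_triangle]
--     lines = {}
--     for vertex in hole[1:]:
--         lines[vertex] = 1
--     for one_ring_vertex in one_ring_vertices:
--         if one_ring_vertex not in lines:
--             continue
--         lines[one_ring_vertex] += 1
--         if lines[one_ring_vertex] > 2:
--             return False
--     return True
-- ===== SOURCE B (Python) =====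
-- def __is_line_use_over_twice(hole, one_ring_triangles):
--     counts = {}
--     for tri in one_ring_triangles:
--         for v in tri:
--             counts[v] = counts.get(v, 0) + 1
--     return not any(counts.get(v, 0) >= 2 for v in hole[1:])
-- ===== Notes on version B (the rewrite author's own statement) =====
-- stated objective: idiomatic
-- what changed: B builds a full count table over the flattened one-ring vertices first and then checks the hole vertices against it, instead of A's interleaved scan that indexes the hole and increments-with-early-exit over the one-ring.
import Mathlib
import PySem

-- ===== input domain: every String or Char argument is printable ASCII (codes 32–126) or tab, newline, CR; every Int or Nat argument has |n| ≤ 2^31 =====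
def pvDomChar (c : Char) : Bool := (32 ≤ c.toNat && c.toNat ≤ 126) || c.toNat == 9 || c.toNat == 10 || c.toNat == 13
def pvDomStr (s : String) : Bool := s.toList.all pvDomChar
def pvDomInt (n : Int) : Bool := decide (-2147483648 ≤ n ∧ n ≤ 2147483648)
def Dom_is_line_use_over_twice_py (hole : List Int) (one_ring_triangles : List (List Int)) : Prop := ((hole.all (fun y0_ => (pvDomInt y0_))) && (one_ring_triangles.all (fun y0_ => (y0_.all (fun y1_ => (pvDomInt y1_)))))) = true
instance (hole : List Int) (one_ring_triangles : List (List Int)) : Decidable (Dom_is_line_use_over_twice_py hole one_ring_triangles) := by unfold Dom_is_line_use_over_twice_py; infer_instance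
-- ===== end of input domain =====

-- B replaces A's interleaved "index the hole, scan the one-ring with early exit" by
-- "count table over the one-ring first, then one check over the hole" (objective: idiomatic).

-- ===== PORT A =====
-- the second loop of A: scan the one-ring vertices, skipping vertices not in `lines`,
-- incrementing and returning False as soon as a count exceeds 2
def pvALoop : List Int → PySem.Dict Int Int → Bool
  | [], _ => true
  | v :: rest, lines =>
    match lines.get? v with
    | none => pvALoop rest lines                           -- 'continue'
    | some n =>
      let lines' := lines.insert v (n + 1)                 -- lines[v] += 1
      if n + 1 > 2 then false else pvALoop rest lines'

def is_line_use_over_twice_py (hole : List Int) (one_ring_triangles : List (List Int)) : Bool :=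
  let one_ring_vertices := one_ring_triangles.flatMap (fun t => t)
  -- hole[1:] is exactly drop 1 for a list
  let lines := (hole.drop 1).foldl (fun d v => d.insert v (1 : Int)) PySem.Dict.empty
  pvALoop one_ring_vertices lines

-- ===== PORT B =====
def is_line_use_over_twice_py_alt (hole : List Int) (one_ring_triangles : List (List Int)) : Bool :=
  let counts : PySem.Dict Int Int :=
    one_ring_triangles.foldl
      (fun d tri => tri.foldl (fun d v => d.insert v (d.getD v 0 + 1)) d)
      PySem.Dict.empty
  !((hole.drop 1).any (fun v => decide (counts.getD v 0 ≥ 2)))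

-- ===== PRECONDITION & SPEC =====
def Spec_is_line_use_over_twice_py (hole : List Int) (one_ring_triangles : List (List Int)) (out : Bool) : Prop := out = is_line_use_over_twice_py_alt hole one_ring_triangles
instance (hole : List Int) (one_ring_triangles : List (List Int)) (out : Bool) : Decidable (Spec_is_line_use_over_twice_py hole one_ring_triangles out) := by unfold Spec_is_line_use_over_twice_py; infer_instance

-- ===== CLAIM (what is proved, stated in full; the proofs are below) =====
def Claim_equal_is_line_use_over_twice_py : Prop := ∀ (hole : List Int) (one_ring_triangles : List (List Int)), Dom_is_line_use_over_twice_py hole one_ring_triangles → Spec_is_line_use_over_twice_py hole one_ring_triangles (is_line_use_over_twice_py hole one_ring_triangles)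

-- ===== LEMMAS AND PROOFS =====

-- v ≠ head ⇒ count unchanged through a cons (orientation used below)
theorem pv_count_cons_ne {v a : Int} (rest : List Int) (hne : v ≠ a) :
    List.count v (a :: rest) = List.count v rest := by
  simp [Ne.symm hne]

-- A's first loop builds the dict mapping every vertex of hole[1:] to 1
theorem pv_get?_foldl_insert_one (l : List Int) (d : PySem.Dict Int Int) (v : Int) :
    ((l.foldl (fun d v => d.insert v (1 : Int)) d).get? v)
      = if v ∈ l then some 1 else d.get? v := by
  induction l generalizing d with
  | nil => simp
  | cons a l ih =>
    simp only [List.foldl_cons, ih, List.mem_cons]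
    by_cases hl : v ∈ l
    · simp [hl]
    · by_cases hv : v = a <;> simp [hl, hv, PySem.Dict.get?_insert]

-- characterisation of A's scan loop: true iff no tracked key's running count ever exceeds 2
theorem pvALoop_true_iff (vs : List Int) (lines : PySem.Dict Int Int) :
    pvALoop vs lines = true ↔
      ∀ v ∈ vs, ∀ n, lines.get? v = some n → n + (vs.count v : Int) ≤ 2 := by
  induction vs generalizing lines with
  | nil => simp [pvALoop]
  | cons a rest ih =>
    cases hget : lines.get? a with
    | none =>
      simp only [pvALoop, hget, ih]
      constructor
      · intro h v hv n hn
        have hne : v ≠ a := fun he => by rw [he, hget] at hn; cases hn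
        rw [List.mem_cons] at hv
        rcases hv with he | hv
        · exact absurd he hne
        · have := h v hv n hn
          rwa [pv_count_cons_ne rest hne]
      · intro h v hv n hn
        have hne : v ≠ a := fun he => by rw [he, hget] at hn; cases hn
        have := h v (List.mem_cons_of_mem _ hv) n hn
        rwa [pv_count_cons_ne rest hne] at this
    | some n =>
      simp only [pvALoop, hget]
      by_cases hgt : n + 1 > 2
      · rw [if_pos hgt]
        constructor
        · intro h; cases h
        · intro h
          exfalso
          have := h a (List.mem_cons_self) n hget
          rw [List.count_cons_self] at this
          push_cast at this
          omega
      · rw [if_neg hgt, ih]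
        constructor
        · intro h v hv n' hn'
          rcases eq_or_ne v a with rfl | hne
          · rw [hget] at hn'
            injection hn' with he
            subst he
            rw [List.count_cons_self]
            by_cases hr : v ∈ rest
            · have := h v hr (n + 1) (by rw [PySem.Dict.get?_insert, if_pos rfl])
              push_cast at this ⊢
              omega
            · rw [List.count_eq_zero_of_not_mem hr]
              push_cast
              omega
          · rw [List.mem_cons] at hv
            rcases hv with he | hv
            · exact absurd he hne
            · have := h v hv n' (by rw [PySem.Dict.get?_insert, if_neg hne]; exact hn')
              rwa [pv_count_cons_ne rest hne]
        · intro h v hv n' hn'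
          rcases eq_or_ne v a with rfl | hne
          · rw [PySem.Dict.get?_insert, if_pos rfl] at hn'
            injection hn' with he
            subst he
            have := h v (List.mem_cons_self) n hget
            rw [List.count_cons_self] at this
            push_cast at this
            omega
          · rw [PySem.Dict.get?_insert, if_neg hne] at hn'
            have := h v (List.mem_cons_of_mem _ hv) n' hn'
            rwa [pv_count_cons_ne rest hne] at this

-- B's nested counting fold computes occurrence counts in the flattened one-ring
theorem pv_getD_nestfold (l : List (List Int)) (d : PySem.Dict Int Int) (v : Int) :
    ((l.foldl (fun d tri => tri.foldl (fun d v => d.insert v (d.getD v 0 + 1)) d) d).getD v 0)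
      = d.getD v 0 + ((l.flatMap (fun t => t)).count v : Int) := by
  induction l generalizing d with
  | nil => simp
  | cons tri l ih =>
    simp only [List.foldl_cons, List.flatMap_cons, List.count_append]
    rw [ih, PySem.Dict.getD_foldl_insert_add_one]
    push_cast
    ring

-- ===== VERDICT (by name: the statement is the Claim_ definition above) =====
theorem is_line_use_over_twice_py_spec : Claim_equal_is_line_use_over_twice_py := by
  unfold Claim_equal_is_line_use_over_twice_py
  intro hole tris _
  unfold Spec_is_line_use_over_twice_py is_line_use_over_twice_py is_line_use_over_twice_py_alt
  rw [Bool.eq_iff_iff, pvALoop_true_iff]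
  constructor
  · intro h
    simp only [Bool.not_eq_eq_eq_not, Bool.not_true, List.any_eq_false]
    intro v hv
    simp only [decide_eq_true_eq]
    rw [pv_getD_nestfold, PySem.Dict.getD_empty]
    by_cases hmem : v ∈ tris.flatMap (fun t => t)
    · have h1 : ((hole.drop 1).foldl (fun d v => d.insert v (1 : Int)) PySem.Dict.empty).get? v
          = some 1 := by rw [pv_get?_foldl_insert_one, if_pos hv]
      have := h v hmem 1 h1
      omega
    · rw [List.count_eq_zero_of_not_mem hmem]
      norm_num
  · intro h v hmem n hn
    rw [pv_get?_foldl_insert_one] at hn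
    by_cases hd : v ∈ hole.drop 1
    · rw [if_pos hd] at hn
      injection hn with he
      subst he
      simp only [Bool.not_eq_eq_eq_not, Bool.not_true, List.any_eq_false] at h
      have := h v hd
      simp only [decide_eq_true_eq] at this
      rw [pv_getD_nestfold, PySem.Dict.getD_empty] at this
      omega
    · rw [if_neg hd, PySem.Dict.get?_empty] at hn
      cases hn
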